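-- pv_equiv track=rewrite | github.com/HuyaneMatsu/scarletio | scarletio/utils/trace/repeat_strategies.py | get_repeat_with_strategy_bot
-- ===== SOURCE A (Python) =====
-- def get_repeat_with_strategy_bot(items):
--     """
--     Gets the bot-most repeat on the given items.
--
--     Parameters
--     ----------
--     items : `None | list`
--         Items to get repeated part of.
--
--     Returns
--     -------
--     repeat : `None | (int, int, int)`
--         On detected repeat returns a tuple of `3` elements:
--         - `start_shift` How much is the first element shifted
--         - `chunk_size` How big 1 repeated chunk is.
--         - `repeat` How much times was the chunk repeated.
--     """
--     if items is None:
--         return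
--
--     items_length = len(items)
--     for chunk_size in range(1, (items_length >> 1) + 1):
--         for start_shift in range(items_length - chunk_size, chunk_size - 1, -1):
--             repeat = 0
--             for additional_element_index in range(start_shift - chunk_size, -1, -chunk_size):
--                 for shift in range(0, chunk_size):
--                     if not (items[start_shift + shift] == items[additional_element_index + shift]):
--                         break
--                 else:
--                     repeat += 1
--                     continue
--                 break
--
--             if repeat * chunk_size >= 2:
--                 return start_shift - (chunk_size * repeat), chunk_size, repeat + 1
-- ===== SOURCE B (Python) =====
-- def get_repeat_with_strategy_bot(items):
--     if items is None:
--         return None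
--     n = len(items)
--     for chunk_size in range(1, (n >> 1) + 1):
--         best = None  # (position, repeat) with maximal position
--         for residue in range(0, chunk_size, 1):
--             run = 0
--             for position in range(residue + chunk_size, n - chunk_size + 1, chunk_size):
--                 if items[position - chunk_size : position] == items[position : position + chunk_size]:
--                     run += 1
--                 else:
--                     run = 0
--                 if run * chunk_size >= 2 and (best is None or position > best[0]):
--                     best = (position, run)
--         if best is not None:
--             position, run = best
--             return position - chunk_size * run, chunk_size, run + 1
--     return None
-- ===== Notes on version B (the rewrite author's own statement) =====
-- stated objective: alternative
-- what changed: A recomputes the repeat count from scratch by scanning backwards chunk-by-chunk at every start_shift; B makes one forward run-length sweep per chunk-size alignment class, maintaining an incremental run counter and the best (maximal start_shift) candidate, then formats the winner.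
import Mathlib
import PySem

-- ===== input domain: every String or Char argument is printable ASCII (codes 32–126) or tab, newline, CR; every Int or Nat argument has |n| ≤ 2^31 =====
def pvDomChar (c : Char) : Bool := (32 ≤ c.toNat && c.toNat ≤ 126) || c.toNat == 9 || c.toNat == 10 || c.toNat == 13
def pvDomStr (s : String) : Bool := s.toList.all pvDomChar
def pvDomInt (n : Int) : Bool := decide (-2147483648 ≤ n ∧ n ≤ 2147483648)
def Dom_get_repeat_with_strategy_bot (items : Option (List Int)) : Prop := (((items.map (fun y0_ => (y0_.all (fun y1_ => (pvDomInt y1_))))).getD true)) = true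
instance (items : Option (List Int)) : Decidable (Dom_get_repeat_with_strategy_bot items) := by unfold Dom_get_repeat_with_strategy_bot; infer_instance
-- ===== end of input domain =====

-- B replaces A's backward repeat-recount at every start_shift by one forward run-length sweep
-- per chunk alignment class, keeping the best (max start_shift) candidate per chunk size (objective: alternative).

-- ===== PORT A =====
-- items[i]; every index A evaluates is in range, so the getD default 0 is never used
def pvAGet (its : List Int) (i : Int) : Int := (PySem.List.pyGet? its i).getD 0

-- inner `for shift in range(0, chunk_size)` with for-else: true ↔ the loop did not break
def pvAAllShift (its : List Int) (ss ai : Int) : List Int → Bool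
  | [] => true
  | sh :: rest => if pvAGet its (ss + sh) == pvAGet its (ai + sh) then pvAAllShift its ss ai rest else false

-- `for additional_element_index in range(start_shift - chunk_size, -1, -chunk_size)` accumulating `repeat`
def pvARepeat (its : List Int) (ss cs : Int) : List Int → Int
  | [] => 0
  | ai :: rest => if pvAAllShift its ss ai (PySem.List.pyRange 0 cs 1) then pvARepeat its ss cs rest + 1 else 0

-- `for start_shift in range(items_length - chunk_size, chunk_size - 1, -1)` with early return
def pvASsLoop (its : List Int) (cs : Int) : List Int → Option (List Int)
  | [] => none
  | ss :: rest =>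
    let rep := pvARepeat its ss cs (PySem.List.pyRange (ss - cs) (-1) (-cs))
    if rep * cs ≥ 2 then some [ss - cs * rep, cs, rep + 1] else pvASsLoop its cs rest

-- `for chunk_size in range(1, (items_length >> 1) + 1)` with early return
def pvACsLoop (its : List Int) (n : Int) : List Int → Option (List Int)
  | [] => none
  | cs :: rest =>
    match pvASsLoop its cs (PySem.List.pyRange (n - cs) (cs - 1) (-1)) with
    | some r => some r
    | none => pvACsLoop its n rest

def get_repeat_with_strategy_bot (items : Option (List Int)) : Option (List Int) :=
  match items with
  | none => none
  | some its =>
    let n : Int := its.length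
    pvACsLoop its n (PySem.List.pyRange 1 ((n >>> (1:Nat)) + 1) 1)

-- ===== PORT B =====
-- body of `for position in range(residue + chunk_size, n - chunk_size + 1, chunk_size)`: state (run, best)
def pvBStep (its : List Int) (cs : Int) (st : Int × Option (Int × Int)) (p : Int) : Int × Option (Int × Int) :=
  let run : Int := if PySem.List.slice its (some (p - cs)) (some p) == PySem.List.slice its (some p) (some (p + cs)) then st.1 + 1 else 0
  let best := if 2 ≤ run * cs && (match st.2 with | none => true | some b => decide (b.1 < p)) then some (p, run) else st.2
  (run, best)

-- `for residue in range(0, chunk_size, 1)`, carrying `best` across residues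
def pvBResLoop (its : List Int) (cs n : Int) : Option (Int × Int) → List Int → Option (Int × Int)
  | best, [] => best
  | best, r :: rest =>
      pvBResLoop its cs n ((PySem.List.pyRange (r + cs) (n - cs + 1) cs).foldl (pvBStep its cs) (0, best)).2 rest

-- `for chunk_size in range(1, (n >> 1) + 1)` with early return on a found candidate
def pvBCsLoop (its : List Int) (n : Int) : List Int → Option (List Int)
  | [] => none
  | cs :: rest =>
    match pvBResLoop its cs n none (PySem.List.pyRange 0 cs 1) with
    | some (p, run) => some [p - cs * run, cs, run + 1]
    | none => pvBCsLoop its n rest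

def get_repeat_with_strategy_bot_alt (items : Option (List Int)) : Option (List Int) :=
  match items with
  | none => none
  | some its =>
    let n : Int := its.length
    pvBCsLoop its n (PySem.List.pyRange 1 ((n >>> (1:Nat)) + 1) 1)

-- ===== PRECONDITION & SPEC =====
def Spec_get_repeat_with_strategy_bot (items : Option (List Int)) (out : Option (List Int)) : Prop := out = get_repeat_with_strategy_bot_alt items
instance (items : Option (List Int)) (out : Option (List Int)) : Decidable (Spec_get_repeat_with_strategy_bot items out) := by unfold Spec_get_repeat_with_strategy_bot; infer_instance

-- ===== CLAIM (what is proved, stated in full; the proofs are below) =====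
def Claim_equal_get_repeat_with_strategy_bot : Prop := ∀ (items : Option (List Int)), Dom_get_repeat_with_strategy_bot items → Spec_get_repeat_with_strategy_bot items (get_repeat_with_strategy_bot items)

-- ===== LEMMAS AND PROOFS =====

-- A's `repeat` value at start position p for chunk size cs
def pvRep (its : List Int) (cs p : Int) : Int := pvARepeat its p cs (PySem.List.pyRange (p - cs) (-1) (-cs))

-- "position p is a candidate" (A's `repeat * chunk_size >= 2` test)
def pvQb (its : List Int) (cs : Int) (p : Int) : Bool := decide (2 ≤ pvRep its cs p * cs)

-- the candidate with maximal position among a list of positions, with its repeat count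
def pvBest (its : List Int) (cs : Int) (V : List Int) : Option (Int × Int) :=
  ((V.filter (pvQb its cs)).max?).map (fun p => (p, pvRep its cs p))

-- range cons/nil for a general negative or positive step (step ±1 forms are in PySem; these are for step ±cs)
theorem pvRange_neg_nil (a b s : Int) (hs : s < 0) (hab : a ≤ b) : PySem.List.pyRange a b s = [] := by
  simp [PySem.List.pyRange, show ¬(s=0) by omega, show ¬(0<s) by omega, show ¬(b<a) by omega]

theorem pvRange_neg_cons (a b s : Int) (hs : s < 0) (hab : b < a) :
    PySem.List.pyRange a b s = a :: PySem.List.pyRange (a + s) b s := by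
  simp only [PySem.List.pyRange, if_neg (show ¬(s=0) by omega), if_neg (show ¬(0<s) by omega),
    if_pos hab]
  have key : a - b + -s - 1 = (a - b - 1) + 1 * -s := by ring
  rw [key, Int.add_mul_ediv_right _ _ (by omega : (-s) ≠ 0)]
  have hm : 0 ≤ (a - b - 1) / -s := Int.ediv_nonneg (by omega) (by omega)
  have htn : ((a - b - 1) / -s + 1).toNat = ((a - b - 1) / -s).toNat + 1 := by omega
  have hcnt : (if b < a + s then ((a + s - b + -s - 1) / -s).toNat else 0) = ((a - b - 1) / -s).toNat := by
    by_cases hb : b < a + s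
    · rw [if_pos hb]
      have : a + s - b + -s - 1 = a - b - 1 := by ring
      rw [this]
    · rw [if_neg hb]
      have hz : (a - b - 1) / -s = 0 := Int.ediv_eq_zero_of_lt (by omega) (by omega)
      omega
  rw [hcnt, htn, List.range_succ_eq_map, List.map_cons, List.map_map]
  congr 1
  · norm_num
  · apply List.map_congr_left
    intro k _
    simp only [Function.comp]
    push_cast
    ring

theorem pvRange_pos_nil (a b s : Int) (hs : 0 < s) (hab : b ≤ a) : PySem.List.pyRange a b s = [] := by
  simp [PySem.List.pyRange, show ¬(s=0) by omega, hs, show ¬(a<b) by omega]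

theorem pvRange_pos_cons (a b s : Int) (hs : 0 < s) (hab : a < b) :
    PySem.List.pyRange a b s = a :: PySem.List.pyRange (a + s) b s := by
  simp only [PySem.List.pyRange, if_neg (show ¬(s=0) by omega), if_pos hs, if_pos hab]
  have key : b - a + s - 1 = (b - a - 1) + 1 * s := by ring
  rw [key, Int.add_mul_ediv_right _ _ (by omega : s ≠ 0)]
  have hm : 0 ≤ (b - a - 1) / s := Int.ediv_nonneg (by omega) (by omega)
  have htn : ((b - a - 1) / s + 1).toNat = ((b - a - 1) / s).toNat + 1 := by omega
  have hcnt : (if a + s < b then ((b - (a + s) + s - 1) / s).toNat else 0) = ((b - a - 1) / s).toNat := by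
    by_cases hb : a + s < b
    · rw [if_pos hb]
      have : b - (a + s) + s - 1 = b - a - 1 := by ring
      rw [this]
    · rw [if_neg hb]
      have hz : (b - a - 1) / s = 0 := Int.ediv_eq_zero_of_lt (by omega) (by omega)
      omega
  rw [hcnt, htn, List.range_succ_eq_map, List.map_cons, List.map_map]
  congr 1
  · norm_num
  · apply List.map_congr_left
    intro k _
    simp only [Function.comp]
    push_cast
    ring

theorem pvAllShift_iff (its : List Int) (ss ai : Int) (L : List Int) :
    pvAAllShift its ss ai L = true ↔ ∀ sh ∈ L, pvAGet its (ss + sh) = pvAGet its (ai + sh) := by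
  induction L with
  | nil => simp [pvAAllShift]
  | cons sh rest ih =>
    by_cases h : pvAGet its (ss + sh) == pvAGet its (ai + sh)
    · have h' : pvAGet its (ss + sh) = pvAGet its (ai + sh) := by simpa using h
      simp only [pvAAllShift, if_pos h, ih, List.mem_cons]
      constructor
      · rintro hrest x (rfl | hx)
        · exact h'
        · exact hrest x hx
      · intro hall x hx
        exact hall x (Or.inr hx)
    · simp only [pvAAllShift, if_neg h, Bool.false_eq_true, false_iff, not_forall]
      refine ⟨sh, List.mem_cons_self .., fun hc => h (by simpa using hc)⟩

theorem pvRepeat_congr (its : List Int) (cs p q : Int)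
    (h : ∀ sh ∈ PySem.List.pyRange 0 cs 1, pvAGet its (p + sh) = pvAGet its (q + sh)) :
    ∀ L, pvARepeat its p cs L = pvARepeat its q cs L := by
  intro L
  induction L with
  | nil => rfl
  | cons ai rest ih =>
    have hb : pvAAllShift its p ai (PySem.List.pyRange 0 cs 1)
        = pvAAllShift its q ai (PySem.List.pyRange 0 cs 1) := by
      rw [Bool.eq_iff_iff, pvAllShift_iff, pvAllShift_iff]
      constructor <;> intro hx sh hsh
      · rw [← h sh hsh]; exact hx sh hsh
      · rw [h sh hsh]; exact hx sh hsh
    simp only [pvARepeat, hb, ih]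

theorem pvRep_rec (its : List Int) (cs p : Int) (hcs : 0 < cs) (hp : 0 ≤ p - cs) :
    pvRep its cs p = if pvAAllShift its p (p - cs) (PySem.List.pyRange 0 cs 1) then pvRep its cs (p - cs) + 1 else 0 := by
  unfold pvRep
  rw [pvRange_neg_cons (p - cs) (-1) (-cs) (by omega) (by omega)]
  simp only [pvARepeat]
  by_cases h : pvAAllShift its p (p - cs) (PySem.List.pyRange 0 cs 1)
  · rw [if_pos h, if_pos h]
    congr 1
    rw [pvRepeat_congr its cs p (p - cs) ((pvAllShift_iff _ _ _ _).mp h)]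
    have harg : p - cs + -cs = p - cs - cs := by ring
    rw [harg]
  · rw [if_neg h, if_neg h]

theorem pvRep_nil (its : List Int) (cs p : Int) (hcs : 0 < cs) (hp : p - cs < 0) : pvRep its cs p = 0 := by
  unfold pvRep
  rw [pvRange_neg_nil (p - cs) (-1) (-cs) (by omega) (by omega)]
  rfl

theorem pvAGet_eq (its : List Int) (i : Int) (h0 : 0 ≤ i) (h1 : i < (its.length : Int)) :
    pvAGet its i = its[i.toNat]'(by omega) := by
  unfold pvAGet
  rw [PySem.List.pyGet?_eq_some_getElem its h0 h1]
  rfl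

theorem pvSlice_eq_allShift (its : List Int) (cs p : Int) (hcs : 0 < cs) (h1 : 0 ≤ p - cs)
    (h2 : p + cs ≤ (its.length : Int)) :
    (PySem.List.slice its (some (p - cs)) (some p) == PySem.List.slice its (some p) (some (p + cs)))
      = pvAAllShift its p (p - cs) (PySem.List.pyRange 0 cs 1) := by
  rw [Bool.eq_iff_iff, beq_iff_eq, pvAllShift_iff]
  rw [PySem.List.slice_toNat its h1 (by omega), PySem.List.slice_toNat its (by omega) (by omega)]
  have e1 : p.toNat - (p - cs).toNat = cs.toNat := by omega
  have e2 : (p + cs).toNat - p.toNat = cs.toNat := by omega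
  rw [e1, e2]
  have hL1 : (List.take cs.toNat (List.drop (p - cs).toNat its)).length = cs.toNat := by
    simp only [List.length_take, List.length_drop]
    omega
  have hL2 : (List.take cs.toNat (List.drop p.toNat its)).length = cs.toNat := by
    simp only [List.length_take, List.length_drop]
    omega
  constructor
  · intro h sh hsh
    obtain ⟨hs0, hsc⟩ := PySem.List.mem_pyRange_one.mp hsh
    have hi : sh.toNat < cs.toNat := by omega
    have hgeq : (List.take cs.toNat (List.drop (p - cs).toNat its))[sh.toNat]'(by omega)
        = (List.take cs.toNat (List.drop p.toNat its))[sh.toNat]'(by omega) := by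
      simp only [h]
    rw [List.getElem_take, List.getElem_drop, List.getElem_take, List.getElem_drop] at hgeq
    rw [pvAGet_eq its (p + sh) (by omega) (by omega), pvAGet_eq its (p - cs + sh) (by omega) (by omega)]
    have i1 : (p + sh).toNat = p.toNat + sh.toNat := by omega
    have i2 : (p - cs + sh).toNat = (p - cs).toNat + sh.toNat := by omega
    simp_rw [i1, i2]
    exact hgeq.symm
  · intro h
    apply List.ext_getElem (by rw [hL1, hL2])
    intro i hh1 hh2
    rw [List.getElem_take, List.getElem_drop, List.getElem_take, List.getElem_drop]
    have hic : i < cs.toNat := by omega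
    have hm : (i : Int) ∈ PySem.List.pyRange 0 cs 1 := PySem.List.mem_pyRange_one.mpr (by omega)
    have := h (i : Int) hm
    rw [pvAGet_eq its (p + (i : Int)) (by omega) (by omega),
        pvAGet_eq its (p - cs + (i : Int)) (by omega) (by omega)] at this
    have i1 : (p + (i : Int)).toNat = p.toNat + i := by omega
    have i2 : (p - cs + (i : Int)).toNat = (p - cs).toNat + i := by omega
    simp_rw [i1, i2] at this
    exact this.symm

theorem pvSsLoop_eq_find (its : List Int) (cs : Int) (L : List Int) :
    pvASsLoop its cs L = (L.find? (pvQb its cs)).map (fun p => [p - cs * pvRep its cs p, cs, pvRep its cs p + 1]) := by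
  induction L with
  | nil => rfl
  | cons ss rest ih =>
    simp only [pvASsLoop, List.find?_cons]
    by_cases h : pvQb its cs ss
    · have h2 : pvARepeat its ss cs (PySem.List.pyRange (ss - cs) (-1) (-cs)) * cs ≥ 2 := by
        have := of_decide_eq_true h
        exact this
      rw [if_pos h2, h]
      rfl
    · have h2 : ¬ (pvARepeat its ss cs (PySem.List.pyRange (ss - cs) (-1) (-cs)) * cs ≥ 2) := by
        intro hc
        exact h (decide_eq_true hc)
      rw [if_neg h2, Bool.not_eq_true] at *
      rw [h, ih]

theorem pvMax?_head?_of_pairwise_gt (l : List Int) (h : l.Pairwise (· > ·)) : l.max? = l.head? := by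
  cases l with
  | nil => rfl
  | cons a t =>
    have hall : ∀ b ∈ a :: t, b ≤ a := by
      intro b hb
      rcases List.mem_cons.mp hb with rfl | hb
      · exact le_refl _
      · exact le_of_lt (List.rel_of_pairwise_cons h hb)
    exact List.max?_eq_some_iff.mpr ⟨List.mem_cons_self .., hall⟩

theorem pvMax?_congr_mem (l₁ l₂ : List Int) (h : ∀ x, x ∈ l₁ ↔ x ∈ l₂) : l₁.max? = l₂.max? := by
  cases h1 : l₁.max? with
  | none =>
    have he : l₁ = [] := List.max?_eq_none_iff.mp h1
    subst he
    have : l₂ = [] := List.eq_nil_iff_forall_not_mem.mpr (fun x hx => by simpa using (h x).mpr hx)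
    rw [this]
    rfl
  | some a =>
    obtain ⟨ha, hall⟩ := List.max?_eq_some_iff.mp h1
    exact (List.max?_eq_some_iff.mpr ⟨(h a).mp ha, fun b hb => hall b ((h b).mpr hb)⟩).symm

theorem pvMax?_append_singleton (l : List Int) (p : Int) :
    (l ++ [p]).max? = some (match l.max? with | none => p | some m => max m p) := by
  cases l with
  | nil => rfl
  | cons a t => simp [List.max?, List.foldl_append]

theorem pvBest_append_singleton (its : List Int) (cs p : Int) (V : List Int) :
    pvBest its cs (V ++ [p]) =
      (if pvQb its cs p && (match pvBest its cs V with | none => true | some b => decide (b.1 < p))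
       then some (p, pvRep its cs p) else pvBest its cs V) := by
  unfold pvBest
  rw [List.filter_append]
  by_cases hq : pvQb its cs p
  · simp only [List.filter_cons, hq, if_pos, List.filter_nil]
    rw [pvMax?_append_singleton]
    cases hm : (V.filter (pvQb its cs)).max? with
    | none => simp
    | some m =>
      by_cases hmp : m < p
      · have hx : max m p = p := max_eq_right (le_of_lt hmp)
        simp [hmp, hx]
      · have hx : max m p = m := max_eq_left (by omega)
        simp [hmp, hx]
  · simp [hq]

theorem pvBStep_eq (its : List Int) (cs p : Int) (V : List Int) (hcs : 0 < cs) (h1 : cs ≤ p)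
    (h2 : p + cs ≤ (its.length : Int)) :
    pvBStep its cs (pvRep its cs (p - cs), pvBest its cs V) p = (pvRep its cs p, pvBest its cs (V ++ [p])) := by
  simp only [pvBStep, pvSlice_eq_allShift its cs p hcs (by omega) h2]
  rw [← pvRep_rec its cs p hcs (by omega)]
  rw [pvBest_append_singleton]
  rfl

theorem pvInnerFold (its : List Int) (cs : Int) (hcs : 0 < cs) :
    ∀ (fuel : Nat) (a : Int) (V : List Int), (((its.length : Int) - cs + 1) - a).toNat ≤ fuel → cs ≤ a →
      ((PySem.List.pyRange a ((its.length : Int) - cs + 1) cs).foldl (pvBStep its cs)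
          (pvRep its cs (a - cs), pvBest its cs V)).2
        = pvBest its cs (V ++ PySem.List.pyRange a ((its.length : Int) - cs + 1) cs) := by
  intro fuel
  induction fuel with
  | zero =>
    intro a V hf ha
    rw [pvRange_pos_nil _ _ _ hcs (by omega)]
    simp
  | succ m ih =>
    intro a V hf ha
    by_cases hab : a < (its.length : Int) - cs + 1
    · rw [pvRange_pos_cons _ _ _ hcs hab, List.foldl_cons,
        pvBStep_eq its cs a V hcs ha (by omega)]
      have ih' := ih (a + cs) (V ++ [a]) (by omega) (by omega)
      simp only [show a + cs - cs = a from by ring] at ih'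
      rw [ih', List.append_assoc]
      rfl
    · rw [pvRange_pos_nil _ _ _ hcs (by omega)]
      simp

theorem pvResLoop_eq (its : List Int) (cs : Int) (hcs : 0 < cs) :
    ∀ (R V : List Int), (∀ r ∈ R, 0 ≤ r ∧ r < cs) →
      pvBResLoop its cs (its.length : Int) (pvBest its cs V) R
        = pvBest its cs (V ++ R.flatMap (fun r => PySem.List.pyRange (r + cs) ((its.length : Int) - cs + 1) cs)) := by
  intro R
  induction R with
  | nil => intro V h; simp [pvBResLoop]
  | cons r rest ih =>
    intro V h
    obtain ⟨hr0, hrc⟩ := h r (List.mem_cons_self ..)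
    simp only [pvBResLoop]
    have hfold := pvInnerFold its cs hcs ((((its.length : Int) - cs + 1) - (r + cs)).toNat) (r + cs) V le_rfl (by omega)
    have hz : pvRep its cs (r + cs - cs) = 0 := by
      rw [show r + cs - cs = r from by ring]
      exact pvRep_nil its cs r hcs (by omega)
    rw [hz] at hfold
    rw [hfold, ih (V ++ PySem.List.pyRange (r + cs) ((its.length : Int) - cs + 1) cs)
      (fun x hx => h x (List.mem_cons_of_mem _ hx))]
    rw [List.flatMap_cons, ← List.append_assoc]

theorem pvFlat_mem (its : List Int) (cs x : Int) (hcs : 0 < cs) :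
    (x ∈ (PySem.List.pyRange 0 cs 1).flatMap (fun r => PySem.List.pyRange (r + cs) ((its.length : Int) - cs + 1) cs))
      ↔ (cs ≤ x ∧ x ≤ (its.length : Int) - cs) := by
  constructor
  · intro hx
    obtain ⟨r, hr, hxr⟩ := List.mem_flatMap.mp hx
    obtain ⟨hr0, hrc⟩ := PySem.List.mem_pyRange_one.mp hr
    obtain ⟨h1, h2, h3⟩ := (PySem.List.mem_pyRange_iff_of_pos hcs x).mp hxr
    omega
  · rintro ⟨hx1, hx2⟩
    refine List.mem_flatMap.mpr ⟨x % cs, ?_, ?_⟩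
    · exact PySem.List.mem_pyRange_one.mpr ⟨Int.emod_nonneg x (by omega), Int.emod_lt_of_pos x hcs⟩
    · refine (PySem.List.mem_pyRange_iff_of_pos hcs x).mpr ⟨?_, by omega, ?_⟩
      · have hq := Int.mul_ediv_add_emod x cs
        have hqq : 1 ≤ x / cs := by
          by_contra hq0
          have hle : x / cs ≤ 0 := by omega
          nlinarith [Int.emod_lt_of_pos x hcs, Int.emod_nonneg x (show cs ≠ 0 by omega),
            mul_nonpos_of_nonneg_of_nonpos (le_of_lt hcs) hle]
        nlinarith [mul_le_mul_of_nonneg_left hqq (le_of_lt hcs),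
          Int.emod_nonneg x (show cs ≠ 0 by omega)]
      · have hq := Int.mul_ediv_add_emod x cs
        exact ⟨x / cs - 1, by linarith [mul_sub cs (x / cs) 1]⟩

theorem pvPerCs (its : List Int) (cs : Int) (hcs : 0 < cs) :
    pvASsLoop its cs (PySem.List.pyRange ((its.length : Int) - cs) (cs - 1) (-1))
      = (match pvBResLoop its cs (its.length : Int) none (PySem.List.pyRange 0 cs 1) with
         | some (p, run) => some [p - cs * run, cs, run + 1]
         | none => none) := by
  have hpair : (PySem.List.pyRange ((its.length : Int) - cs) (cs - 1) (-1)).Pairwise (· > ·) := by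
    rw [PySem.List.pyRange_neg_one_eq_reverse]
    exact List.pairwise_reverse.mpr (PySem.List.pairwise_lt_pyRange_one _ _)
  have hB := pvResLoop_eq its cs hcs (PySem.List.pyRange 0 cs 1) []
    (fun r hr => by have := PySem.List.mem_pyRange_one.mp hr; omega)
  simp only [List.nil_append] at hB
  have hnone : (none : Option (Int × Int)) = pvBest its cs [] := rfl
  rw [pvSsLoop_eq_find, hnone, hB]
  have hfind : (PySem.List.pyRange ((its.length : Int) - cs) (cs - 1) (-1)).find? (pvQb its cs)
      = (((PySem.List.pyRange 0 cs 1).flatMap (fun r => PySem.List.pyRange (r + cs) ((its.length : Int) - cs + 1) cs)).filter (pvQb its cs)).max? := by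
    rw [← List.head?_filter, ← pvMax?_head?_of_pairwise_gt _ (List.Pairwise.filter _ hpair)]
    apply pvMax?_congr_mem
    intro x
    simp only [List.mem_filter]
    constructor
    · rintro ⟨hm, hq⟩
      have := PySem.List.mem_pyRange_neg_one.mp hm
      exact ⟨(pvFlat_mem its cs x hcs).mpr (by omega), hq⟩
    · rintro ⟨hm, hq⟩
      have := (pvFlat_mem its cs x hcs).mp hm
      exact ⟨PySem.List.mem_pyRange_neg_one.mpr (by omega), hq⟩
  rw [hfind]
  unfold pvBest
  cases hmax : (((PySem.List.pyRange 0 cs 1).flatMap (fun r => PySem.List.pyRange (r + cs) ((its.length : Int) - cs + 1) cs)).filter (pvQb its cs)).max? with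
  | none => rfl
  | some m => rfl

theorem pvCsLoop_eq (its : List Int) : ∀ (L : List Int), (∀ cs ∈ L, 0 < cs) →
    pvACsLoop its (its.length : Int) L = pvBCsLoop its (its.length : Int) L := by
  intro L
  induction L with
  | nil => intro _; rfl
  | cons cs rest ih =>
    intro h
    simp only [pvACsLoop, pvBCsLoop]
    rw [pvPerCs its cs (h cs (List.mem_cons_self ..))]
    cases pvBResLoop its cs (its.length : Int) none (PySem.List.pyRange 0 cs 1) with
    | none => exact ih (fun c hc => h c (List.mem_cons_of_mem _ hc))
    | some pr => rfl

-- ===== VERDICT (by name: the statement is the Claim_ definition above) =====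
theorem get_repeat_with_strategy_bot_spec : Claim_equal_get_repeat_with_strategy_bot := by
  intro items _
  unfold Spec_get_repeat_with_strategy_bot get_repeat_with_strategy_bot get_repeat_with_strategy_bot_alt
  cases items with
  | none => rfl
  | some its =>
    show pvACsLoop its (its.length : Int) (PySem.List.pyRange 1 (((its.length : Int) >>> (1:Nat)) + 1) 1)
        = pvBCsLoop its (its.length : Int) (PySem.List.pyRange 1 (((its.length : Int) >>> (1:Nat)) + 1) 1)
    refine pvCsLoop_eq its _ (fun cs hcs => ?_)
    have := (PySem.List.mem_pyRange_one).mp hcs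
    omega
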